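-- pv_equiv track=rewrite | github.com/zzhuoxin1508/ME5413_Final_Project | src/me5413_world/scripts/box_mapper.py | _remove_larger_when_fully_covers
-- ===== SOURCE A (Python) =====
-- def _bbox_area(r):
--     return r[2] * r[3]
--
-- def _fully_covers(outer, inner):
--     ox, oy, ow, oh = outer
--     ix, iy, iw, ih = inner
--     return (
--         ox <= ix and
--         oy <= iy and
--         ox + ow >= ix + iw and
--         oy + oh >= iy + ih
--     )
--
-- def _remove_larger_when_fully_covers(candidates):
--     n = len(candidates)
--     if n <= 1:
--         return candidates
--
--     remove = set()
--     for i in range(n):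
--         for j in range(n):
--             if i == j or i in remove or j in remove:
--                 continue
--
--             ri = (
--                 candidates[i]["x"],
--                 candidates[i]["y"],
--                 candidates[i]["w"],
--                 candidates[i]["h"],
--             )
--             rj = (
--                 candidates[j]["x"],
--                 candidates[j]["y"],
--                 candidates[j]["w"],
--                 candidates[j]["h"],
--             )
--
--             ai = _bbox_area(ri)
--             aj = _bbox_area(rj)
--
--             if _fully_covers(ri, rj) and ai > aj:
--                 remove.add(i)
--             elif _fully_covers(rj, ri) and aj > ai:
--                 remove.add(j)
--
--     return [candidates[k] for k in range(n) if k not in remove]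
-- ===== SOURCE B (Python) =====
-- def _remove_larger_when_fully_covers(candidates):
--     if len(candidates) <= 1:
--         return candidates
--
--     rects = [(c["x"], c["y"], c["w"], c["h"]) for c in candidates]
--     by_area = sorted(rects, key=lambda r: r[2] * r[3])
--
--     out = []
--     for r, c in zip(rects, candidates):
--         a = r[2] * r[3]
--         covers_smaller = False
--         for s in by_area:
--             if s[2] * s[3] >= a:
--                 break
--             if (r[0] <= s[0] and r[1] <= s[1]
--                     and r[0] + r[2] >= s[0] + s[2]
--                     and r[1] + r[3] >= s[1] + s[3]):
--                 covers_smaller = True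
--                 break
--         if not covers_smaller:
--             out.append(c)
--     return out
-- ===== Notes on version B (the rewrite author's own statement) =====
-- stated objective: alternative
-- what changed: Replaced the stateful all-pairs remove-set cascade by a sort-based scheme: sort the rectangles once by area ascending, then keep a candidate iff it does not fully cover any rectangle in its strictly-smaller-area prefix of the sorted list (the scan stops at the first rectangle of equal or larger area, so no area comparison or removal state is needed); this is correct because the cascade removes exactly the rectangles that fully cover some strictly-smaller-area rectangle.
import Mathlib
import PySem

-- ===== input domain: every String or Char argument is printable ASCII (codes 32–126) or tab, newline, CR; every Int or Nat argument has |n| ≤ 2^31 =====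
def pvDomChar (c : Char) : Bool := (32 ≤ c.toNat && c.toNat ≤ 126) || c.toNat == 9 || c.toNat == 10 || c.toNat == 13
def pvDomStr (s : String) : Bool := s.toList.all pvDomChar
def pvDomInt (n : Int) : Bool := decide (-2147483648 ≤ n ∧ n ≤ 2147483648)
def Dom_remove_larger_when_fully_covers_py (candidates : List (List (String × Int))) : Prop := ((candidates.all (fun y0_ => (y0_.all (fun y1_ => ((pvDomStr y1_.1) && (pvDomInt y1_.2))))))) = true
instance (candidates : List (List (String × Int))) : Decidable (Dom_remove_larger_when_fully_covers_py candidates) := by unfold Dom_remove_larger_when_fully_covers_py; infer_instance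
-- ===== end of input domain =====

-- B replaces A's stateful remove-set cascade by: sort the rectangles by area ascending once,
-- then keep a candidate iff it does not fully cover any rectangle in its strictly-smaller-area
-- sorted prefix (no area comparison inside the scan) — objective: alternative/simpler decomposition.


-- shared accessor: the four dict lookups c["x"], c["y"], c["w"], c["h"] both Pythons perform
-- (exact under Pre_, which guarantees the keys are present wherever they are looked up)
def pvRect (c : List (String × Int)) : Int × Int × Int × Int :=
  ((PySem.Dict.mk c).getD "x" 0, (PySem.Dict.mk c).getD "y" 0,
   (PySem.Dict.mk c).getD "w" 0, (PySem.Dict.mk c).getD "h" 0)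

-- ===== PORT A =====
def pvBboxArea (r : Int × Int × Int × Int) : Int := r.2.2.1 * r.2.2.2

def pvFullyCovers (outer inner : Int × Int × Int × Int) : Bool :=
  decide (outer.1 ≤ inner.1) && decide (outer.2.1 ≤ inner.2.1) &&
  decide (outer.1 + outer.2.2.1 ≥ inner.1 + inner.2.2.1) &&
  decide (outer.2.1 + outer.2.2.2 ≥ inner.2.1 + inner.2.2.2)

def remove_larger_when_fully_covers_py (candidates : List (List (String × Int))) : List (List (String × Int)) :=
  let n : Int := candidates.length
  if n ≤ 1 then candidates
  else
    let remove : PySem.Set Int :=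
      (PySem.List.pyRange 0 n 1).foldl (fun remove i =>
        (PySem.List.pyRange 0 n 1).foldl (fun remove j =>
          if i == j || PySem.Set.contains remove i || PySem.Set.contains remove j then remove
          else
            let ri := pvRect (PySem.List.pyGetD candidates i [])
            let rj := pvRect (PySem.List.pyGetD candidates j [])
            let ai := pvBboxArea ri
            let aj := pvBboxArea rj
            if pvFullyCovers ri rj && decide (ai > aj) then PySem.Set.add remove i
            else if pvFullyCovers rj ri && decide (aj > ai) then PySem.Set.add remove j
            else remove) remove) PySem.Set.empty
    ((PySem.List.pyRange 0 n 1).filter (fun k => !(PySem.Set.contains remove k))).map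
      (fun k => PySem.List.pyGetD candidates k [])

-- ===== PORT B =====
-- the inner 'for s in by_area: if area(s) >= a: break; if covers: covers_smaller = True; break' loop
def pvCoversSmaller (r : Int × Int × Int × Int) (a : Int) : List (Int × Int × Int × Int) → Bool
  | [] => false
  | s :: t =>
    if decide (s.2.2.1 * s.2.2.2 ≥ a) then false
    else if decide (r.1 ≤ s.1) && decide (r.2.1 ≤ s.2.1) &&
            decide (r.1 + r.2.2.1 ≥ s.1 + s.2.2.1) &&
            decide (r.2.1 + r.2.2.2 ≥ s.2.1 + s.2.2.2) then true
    else pvCoversSmaller r a t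

def remove_larger_when_fully_covers_py_alt (candidates : List (List (String × Int))) : List (List (String × Int)) :=
  if (candidates.length : Int) ≤ 1 then candidates
  else
    let rects := candidates.map pvRect
    let by_area := PySem.List.sorted rects (fun r => r.2.2.1 * r.2.2.2) false
    (rects.zip candidates).foldl (fun out rc =>
      if pvCoversSmaller rc.1 (rc.1.2.2.1 * rc.1.2.2.2) by_area then out else out ++ [rc.2]) []

-- ===== PRECONDITION & SPEC =====
-- Pre_ excludes exactly the inputs where Python A raises KeyError: with two or more candidates
-- every candidate dict must carry the keys "x","y","w","h" (with at most one, A returns untouched).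
def Pre_remove_larger_when_fully_covers_py (candidates : List (List (String × Int))) : Prop :=
  candidates.length ≤ 1 ∨
    ∀ c ∈ candidates, ((PySem.Dict.mk c).contains "x" ∧ (PySem.Dict.mk c).contains "y" ∧
                       (PySem.Dict.mk c).contains "w" ∧ (PySem.Dict.mk c).contains "h")
instance (candidates : List (List (String × Int))) : Decidable (Pre_remove_larger_when_fully_covers_py candidates) := by unfold Pre_remove_larger_when_fully_covers_py; infer_instance

def pvWitness_remove_larger_when_fully_covers_py : (List (List (String × Int))) :=
  [[("x", 0), ("y", 0), ("w", 5), ("h", 5)], [("x", 1), ("y", 1), ("w", 2), ("h", 2)]]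

def Spec_remove_larger_when_fully_covers_py (candidates : List (List (String × Int))) (out : List (List (String × Int))) : Prop := out = remove_larger_when_fully_covers_py_alt candidates
instance (candidates : List (List (String × Int))) (out : List (List (String × Int))) : Decidable (Spec_remove_larger_when_fully_covers_py candidates out) := by unfold Spec_remove_larger_when_fully_covers_py; infer_instance

-- ===== CLAIM =====
def Claim_equal_remove_larger_when_fully_covers_py : Prop := ∀ (candidates : List (List (String × Int))), Dom_remove_larger_when_fully_covers_py candidates → Pre_remove_larger_when_fully_covers_py candidates → Spec_remove_larger_when_fully_covers_py candidates (remove_larger_when_fully_covers_py candidates)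

-- ===== LEMMAS AND PROOFS =====

-- the strict-cover predicate both sides are shown to compute
def pvStrictlyCovers (a b : Int × Int × Int × Int) : Bool :=
  pvFullyCovers a b && decide (pvBboxArea a > pvBboxArea b)

-- proof-side helpers: names for the two fold steps of port A (definitionally equal to its lambdas)
def pvInnerStep (cs : List (List (String × Int))) (i : Int) (remove : PySem.Set Int) (j : Int) : PySem.Set Int :=
  if i == j || PySem.Set.contains remove i || PySem.Set.contains remove j then remove
  else if pvFullyCovers (pvRect (PySem.List.pyGetD cs i [])) (pvRect (PySem.List.pyGetD cs j [])) &&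
          decide (pvBboxArea (pvRect (PySem.List.pyGetD cs i [])) > pvBboxArea (pvRect (PySem.List.pyGetD cs j []))) then
    PySem.Set.add remove i
  else if pvFullyCovers (pvRect (PySem.List.pyGetD cs j [])) (pvRect (PySem.List.pyGetD cs i [])) &&
          decide (pvBboxArea (pvRect (PySem.List.pyGetD cs j [])) > pvBboxArea (pvRect (PySem.List.pyGetD cs i []))) then
    PySem.Set.add remove j
  else remove

def pvOuterStep (cs : List (List (String × Int))) (remove : PySem.Set Int) (i : Int) : PySem.Set Int :=
  (PySem.List.pyRange 0 (cs.length : Int) 1).foldl (pvInnerStep cs i) remove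

def pvFinal (cs : List (List (String × Int))) : PySem.Set Int :=
  (PySem.List.pyRange 0 (cs.length : Int) 1).foldl (pvOuterStep cs) PySem.Set.empty

def pvR (cs : List (List (String × Int))) (i : Int) : Int × Int × Int × Int :=
  pvRect (PySem.List.pyGetD cs i [])

def pvC (cs : List (List (String × Int))) (i j : Int) : Bool :=
  pvStrictlyCovers (pvR cs i) (pvR cs j)

theorem pvA_eq (cs : List (List (String × Int))) :
    remove_larger_when_fully_covers_py cs =
      if (cs.length : Int) ≤ 1 then cs
      else ((PySem.List.pyRange 0 (cs.length : Int) 1).filter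
              (fun k => !(PySem.Set.contains (pvFinal cs) k))).map
        (fun k => PySem.List.pyGetD cs k []) := rfl

theorem pvCovers_cond (a b : Int × Int × Int × Int) :
    (pvFullyCovers a b && decide (pvBboxArea a > pvBboxArea b)) = pvStrictlyCovers a b := rfl

theorem pvC_irrefl (cs : List (List (String × Int))) (i : Int) : pvC cs i i = false := by
  simp [pvC, pvStrictlyCovers]

theorem pvC_area {cs : List (List (String × Int))} {i j : Int} (h : pvC cs i j = true) :
    pvBboxArea (pvR cs j) < pvBboxArea (pvR cs i) := by
  simp only [pvC, pvStrictlyCovers, Bool.and_eq_true, decide_eq_true_eq] at h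
  exact h.2

theorem pvC_trans {cs : List (List (String × Int))} {i j k : Int}
    (h1 : pvC cs i j = true) (h2 : pvC cs j k = true) : pvC cs i k = true := by
  simp only [pvC, pvStrictlyCovers, pvFullyCovers, Bool.and_eq_true, decide_eq_true_eq] at h1 h2 ⊢
  obtain ⟨⟨⟨⟨a1, a2⟩, a3⟩, a4⟩, a5⟩ := h1
  obtain ⟨⟨⟨⟨b1, b2⟩, b3⟩, b4⟩, b5⟩ := h2
  exact ⟨⟨⟨⟨le_trans a1 b1, le_trans a2 b2⟩, le_trans b3 a3⟩, le_trans b4 a4⟩, lt_trans b5 a5⟩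

theorem pvMem_innerStep {cs : List (List (String × Int))} {i : Int} {rem : PySem.Set Int}
    {x : Int} (h : x ∈ rem) (j : Int) : x ∈ pvInnerStep cs i rem j := by
  unfold pvInnerStep
  split
  · exact h
  · split
    · exact (PySem.Set.mem_add _ _ _).2 (Or.inl h)
    · split
      · exact (PySem.Set.mem_add _ _ _).2 (Or.inl h)
      · exact h

theorem pvMem_foldl_inner {cs : List (List (String × Int))} {i : Int} (l : List Int)
    {rem : PySem.Set Int} {x : Int} (h : x ∈ rem) :
    x ∈ l.foldl (pvInnerStep cs i) rem := by
  induction l generalizing rem with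
  | nil => exact h
  | cons b t ih => exact ih (pvMem_innerStep h b)

theorem pvMem_foldl_outer {cs : List (List (String × Int))} (l : List Int)
    {rem : PySem.Set Int} {x : Int} (h : x ∈ rem) :
    x ∈ l.foldl (pvOuterStep cs) rem := by
  induction l generalizing rem with
  | nil => exact h
  | cons a t ih => exact ih (pvMem_foldl_inner _ h)

theorem pvContains_iff {s : PySem.Set Int} {x : Int} : PySem.Set.contains s x = true ↔ x ∈ s := by
  simp [PySem.Set.contains]

theorem pvSound_innerStep {cs : List (List (String × Int))} {i : Int} {rem : PySem.Set Int}
    {x j : Int} (h : x ∈ pvInnerStep cs i rem j) :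
    x ∈ rem ∨ (x = i ∧ pvC cs i j = true) ∨ (x = j ∧ pvC cs j i = true) := by
  unfold pvInnerStep at h
  split at h
  · exact Or.inl h
  · rw [pvCovers_cond] at h
    split at h
    · rcases (PySem.Set.mem_add _ _ _).1 h with h' | h'
      · exact Or.inl h'
      · exact Or.inr (Or.inl ⟨h', by assumption⟩)
    · rw [pvCovers_cond] at h
      split at h
      · rcases (PySem.Set.mem_add _ _ _).1 h with h' | h'
        · exact Or.inl h'
        · exact Or.inr (Or.inr ⟨h', by assumption⟩)
      · exact Or.inl h

theorem pvSound_inner {cs : List (List (String × Int))} {i : Int} (l : List Int)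
    {rem : PySem.Set Int} {x : Int} (h : x ∈ l.foldl (pvInnerStep cs i) rem) :
    x ∈ rem ∨ (∃ j ∈ l, x = i ∧ pvC cs i j = true) ∨ (x ∈ l ∧ pvC cs x i = true) := by
  induction l generalizing rem with
  | nil => exact Or.inl h
  | cons b t ih =>
    rcases ih h with h' | h' | h'
    · rcases pvSound_innerStep h' with h'' | h'' | h''
      · exact Or.inl h''
      · exact Or.inr (Or.inl ⟨b, List.mem_cons_self, h''⟩)
      · exact Or.inr (Or.inr ⟨h''.1 ▸ List.mem_cons_self, h''.1 ▸ h''.2⟩)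
    · obtain ⟨j, hj, hx⟩ := h'
      exact Or.inr (Or.inl ⟨j, List.mem_cons_of_mem _ hj, hx⟩)
    · exact Or.inr (Or.inr ⟨List.mem_cons_of_mem _ h'.1, h'.2⟩)

theorem pvSound_outer {cs : List (List (String × Int))} (l : List Int)
    {rem : PySem.Set Int} {x : Int}
    (hl : ∀ a ∈ l, a ∈ PySem.List.pyRange 0 (cs.length : Int) 1)
    (h : x ∈ l.foldl (pvOuterStep cs) rem) :
    x ∈ rem ∨ ∃ k ∈ PySem.List.pyRange 0 (cs.length : Int) 1, pvC cs x k = true := by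
  induction l generalizing rem with
  | nil => exact Or.inl h
  | cons a t ih =>
    rcases ih (fun b hb => hl b (List.mem_cons_of_mem _ hb)) h with h' | h'
    · rcases pvSound_inner _ h' with h'' | h'' | h''
      · exact Or.inl h''
      · obtain ⟨j, hj, hx, hc⟩ := h''
        exact Or.inr ⟨j, hj, hx ▸ hc⟩
      · exact Or.inr ⟨a, hl a List.mem_cons_self, h''.2⟩
    · exact Or.inr h'

theorem pvPair_inner {cs : List (List (String × Int))} {i j : Int} (l : List Int)
    (rem : PySem.Set Int) (hj : j ∈ l) (hc : pvC cs i j = true) :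
    i ∈ l.foldl (pvInnerStep cs i) rem ∨ j ∈ l.foldl (pvInnerStep cs i) rem := by
  induction l generalizing rem with
  | nil => cases hj
  | cons b t ih =>
    rw [List.foldl_cons]
    rcases List.mem_cons.1 hj with hb | hb
    · subst hb
      by_cases hg : (i == j || PySem.Set.contains rem i || PySem.Set.contains rem j) = true
      · rcases Bool.or_eq_true_iff.1 hg with hg' | hg'
        · rcases Bool.or_eq_true_iff.1 hg' with hg'' | hg''
          · exfalso
            have := eq_of_beq hg''
            rw [this, pvC_irrefl] at hc
            exact Bool.false_ne_true hc
          · exact Or.inl (pvMem_foldl_inner _ (pvMem_innerStep (pvContains_iff.1 hg'') j))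
        · exact Or.inr (pvMem_foldl_inner _ (pvMem_innerStep (pvContains_iff.1 hg') j))
      · have hstep : i ∈ pvInnerStep cs i rem j := by
          unfold pvInnerStep
          rw [if_neg hg, pvCovers_cond]
          simp only [pvC, pvR] at hc
          rw [if_pos hc]
          exact (PySem.Set.mem_add _ _ _).2 (Or.inr rfl)
        exact Or.inl (pvMem_foldl_inner _ hstep)
    · exact ih (pvInnerStep cs i rem b) hb

theorem pvPair_outer {cs : List (List (String × Int))} {i j : Int} (l : List Int)
    (rem : PySem.Set Int) (hi : i ∈ l)
    (hj : j ∈ PySem.List.pyRange 0 (cs.length : Int) 1) (hc : pvC cs i j = true)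
    (hnj : j ∉ l.foldl (pvOuterStep cs) rem) :
    i ∈ l.foldl (pvOuterStep cs) rem := by
  induction l generalizing rem with
  | nil => cases hi
  | cons a t ih =>
    rw [List.foldl_cons] at hnj ⊢
    rcases List.mem_cons.1 hi with ha | ha
    · subst ha
      rcases pvPair_inner (PySem.List.pyRange 0 (cs.length : Int) 1) rem hj hc with h | h
      · exact pvMem_foldl_outer _ h
      · exact absurd (pvMem_foldl_outer _ h) hnj
    · exact ih _ ha hnj

theorem pvCountP_lt {p q : Int → Bool} (l : List Int) (h : ∀ x ∈ l, p x = true → q x = true)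
    {k : Int} (hk : k ∈ l) (hq : q k = true) (hp : p k = false) :
    l.countP p < l.countP q := by
  induction l with
  | nil => cases hk
  | cons a t ih =>
    rw [List.countP_cons, List.countP_cons]
    rcases List.mem_cons.1 hk with ha | ha
    · subst ha
      rw [hq, hp]
      have hmono : t.countP p ≤ t.countP q :=
        List.countP_mono_left (fun x hx => h x (List.mem_cons_of_mem _ hx))
      norm_num
      omega
    · have hlt := ih (fun x hx hpx => h x (List.mem_cons_of_mem _ hx) hpx) ha
      by_cases hpa : p a = true
      · rw [if_pos hpa, if_pos (h a List.mem_cons_self hpa)]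
        omega
      · rw [if_neg hpa]
        split <;> omega

theorem pvChase {cs : List (List (String × Int))} (N : ℕ) :
    ∀ i j : Int, (PySem.List.pyRange 0 (cs.length : Int) 1).countP
        (fun x => decide (pvBboxArea (pvR cs x) < pvBboxArea (pvR cs j))) ≤ N →
      i ∈ PySem.List.pyRange 0 (cs.length : Int) 1 →
      j ∈ PySem.List.pyRange 0 (cs.length : Int) 1 →
      pvC cs i j = true → i ∈ pvFinal cs := by
  induction N with
  | zero =>
    intro i j hm hi hj hc
    by_cases hjf : j ∈ pvFinal cs
    · rcases pvSound_outer _ (fun a ha => ha) hjf with h | ⟨k, hk, hck⟩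
      · cases h
      · exfalso
        have hlt := pvCountP_lt
          (p := fun x => decide (pvBboxArea (pvR cs x) < pvBboxArea (pvR cs k)))
          (q := fun x => decide (pvBboxArea (pvR cs x) < pvBboxArea (pvR cs j)))
          (PySem.List.pyRange 0 (cs.length : Int) 1)
          (fun x _ hx => decide_eq_true (lt_trans (of_decide_eq_true hx) (pvC_area hck)))
          hk (decide_eq_true (pvC_area hck)) (by simp)
        omega
    · exact pvPair_outer _ _ hi hj hc hjf
  | succ N ih =>
    intro i j hm hi hj hc
    by_cases hjf : j ∈ pvFinal cs
    · rcases pvSound_outer _ (fun a ha => ha) hjf with h | ⟨k, hk, hck⟩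
      · cases h
      · have hlt := pvCountP_lt
          (p := fun x => decide (pvBboxArea (pvR cs x) < pvBboxArea (pvR cs k)))
          (q := fun x => decide (pvBboxArea (pvR cs x) < pvBboxArea (pvR cs j)))
          (PySem.List.pyRange 0 (cs.length : Int) 1)
          (fun x _ hx => decide_eq_true (lt_trans (of_decide_eq_true hx) (pvC_area hck)))
          hk (decide_eq_true (pvC_area hck)) (by simp)
        exact ih i k (by omega) hi hk (pvC_trans hc hck)
    · exact pvPair_outer _ _ hi hj hc hjf

theorem pvR_mem {cs : List (List (String × Int))} {j : Int}
    (hj : j ∈ PySem.List.pyRange 0 (cs.length : Int) 1) :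
    pvR cs j ∈ cs.map pvRect := by
  rcases PySem.List.mem_pyRange_one.1 hj with ⟨h0, hn⟩
  exact List.mem_map_of_mem (PySem.List.pyGetD_mem cs [] (by
    simp only [PySem.Raise.InRange]
    omega))

theorem pvCharacterize {cs : List (List (String × Int))} {k : Int}
    (hk : k ∈ PySem.List.pyRange 0 (cs.length : Int) 1) :
    PySem.Set.contains (pvFinal cs) k =
      (cs.map pvRect).any (fun s => pvStrictlyCovers (pvR cs k) s) := by
  by_cases h : k ∈ pvFinal cs
  · rw [pvContains_iff.2 h, eq_comm, List.any_eq_true]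
    rcases pvSound_outer _ (fun a ha => ha) h with h' | ⟨j, hj, hc⟩
    · cases h'
    · exact ⟨pvR cs j, pvR_mem hj, hc⟩
  · have hkf : PySem.Set.contains (pvFinal cs) k = false :=
      Bool.eq_false_iff.2 (fun hcon => h (pvContains_iff.1 hcon))
    rw [hkf, eq_comm, Bool.eq_false_iff]
    intro hany
    rcases List.any_eq_true.1 hany with ⟨s, hs, hcov⟩
    rcases List.mem_map.1 hs with ⟨c, hc, rfl⟩
    rcases List.mem_iff_getElem.1 hc with ⟨m, hm, rfl⟩
    have hmL : (m : Int) ∈ PySem.List.pyRange 0 (cs.length : Int) 1 :=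
      PySem.List.mem_pyRange_one.2 ⟨by positivity, by exact_mod_cast hm⟩
    have hRm : pvR cs (m : Int) = pvRect cs[m] := by
      simp [pvR, PySem.List.pyGetD_natCast, List.getD, List.getElem?_eq_getElem hm]
    have hCk : pvC cs k (m : Int) = true := by
      rw [pvC, hRm]; exact hcov
    exact h (pvChase _ k (m : Int) (le_refl _) hk hmL hCk)

theorem pvFilterMapAux (f : Int → List (String × Int)) (p : List (String × Int) → Bool) (l : List Int) :
    (l.filter (fun k => p (f k))).map f = (l.map f).filter p := by
  induction l with
  | nil => rfl
  | cons a t ih => by_cases h : p (f a) <;> simp [h, ih]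

theorem pvZipFilterAux (q : Int × Int × Int × Int → Bool) (cs : List (List (String × Int))) :
    (((cs.map pvRect).zip cs).filter (fun rc => q rc.1)).map (fun rc => rc.2) =
      cs.filter (fun c => q (pvRect c)) := by
  induction cs with
  | nil => rfl
  | cons c t ih =>
    simp only [List.map_cons, List.zip_cons_cons, List.filter_cons]
    by_cases h : q (pvRect c) <;> simp [h, ih]

-- B-side: the break-out prefix scan over the area-sorted list equals the strict-cover any-test
theorem pvCoversSmaller_eq_any (r : Int × Int × Int × Int) (l : List (Int × Int × Int × Int))
    (hs : l.Pairwise (fun a b => a.2.2.1 * a.2.2.2 ≤ b.2.2.1 * b.2.2.2)) :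
    pvCoversSmaller r (r.2.2.1 * r.2.2.2) l = l.any (fun s => pvStrictlyCovers r s) := by
  induction l with
  | nil => rfl
  | cons s t ih =>
    rw [List.pairwise_cons] at hs
    obtain ⟨hhead, htail⟩ := hs
    rw [List.any_cons, pvCoversSmaller]
    by_cases hge : (s.2.2.1 * s.2.2.2 ≥ r.2.2.1 * r.2.2.2)
    · rw [if_pos (decide_eq_true hge)]
      have hh : pvStrictlyCovers r s = false := by
        rw [Bool.eq_false_iff]
        simp only [pvStrictlyCovers, pvBboxArea, ne_eq, Bool.and_eq_true, decide_eq_true_eq, not_and]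
        intro _; omega
      have ht : t.any (fun s => pvStrictlyCovers r s) = false := by
        rw [List.any_eq_false]
        intro x hx
        have := hhead x hx
        simp only [pvStrictlyCovers, pvBboxArea, Bool.and_eq_true, decide_eq_true_eq, not_and]
        intro _; omega
      rw [hh, ht]; rfl
    · have hlt : decide (s.2.2.1 * s.2.2.2 ≥ r.2.2.1 * r.2.2.2) = false := by
        simp only [decide_eq_false_iff_not]; exact hge
      rw [if_neg (by simp [hlt])]
      by_cases hcov : (decide (r.1 ≤ s.1) && decide (r.2.1 ≤ s.2.1) &&
            decide (r.1 + r.2.2.1 ≥ s.1 + s.2.2.1) &&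
            decide (r.2.1 + r.2.2.2 ≥ s.2.1 + s.2.2.2)) = true
      · rw [if_pos hcov]
        have : pvStrictlyCovers r s = true := by
          simp only [pvStrictlyCovers, pvFullyCovers, pvBboxArea, Bool.and_eq_true,
            decide_eq_true_eq] at hcov ⊢
          exact ⟨⟨⟨⟨hcov.1.1.1, hcov.1.1.2⟩, hcov.1.2⟩, hcov.2⟩, by omega⟩
        rw [this]; rfl
      · rw [if_neg hcov, ih htail]
        have : pvStrictlyCovers r s = false := by
          simp only [pvStrictlyCovers, pvFullyCovers] at *
          rcases Bool.eq_false_iff.2 hcov |>.symm with h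
          cases hpv : (decide (r.1 ≤ s.1) && decide (r.2.1 ≤ s.2.1) &&
            decide (r.1 + r.2.2.1 ≥ s.1 + s.2.2.1) &&
            decide (r.2.1 + r.2.2.2 ≥ s.2.1 + s.2.2.2)) with
          | false => simp
          | true => exact absurd hpv hcov
        rw [this, Bool.false_or]

theorem pvAny_perm {l₁ l₂ : List (Int × Int × Int × Int)} (h : l₁.Perm l₂)
    (f : Int × Int × Int × Int → Bool) : l₁.any f = l₂.any f := by
  cases hb : l₂.any f with
  | true =>
    rcases List.any_eq_true.1 hb with ⟨x, hx, hfx⟩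
    exact List.any_eq_true.2 ⟨x, h.mem_iff.2 hx, hfx⟩
  | false =>
    rw [List.any_eq_false] at hb ⊢
    exact fun x hx => hb x (h.mem_iff.1 hx)

theorem pvFoldlAppendIf (g : (Int × Int × Int × Int) × List (String × Int) → Bool)
    (l : List ((Int × Int × Int × Int) × List (String × Int))) :
    l.foldl (fun out rc => if g rc then out else out ++ [rc.2]) [] =
      (l.filter (fun rc => !(g rc))).map (fun rc => rc.2) := by
  have h := PySem.List.foldl_append_if (l := l) (p := fun rc => !(g rc)) (f := fun rc => rc.2)
    (acc := ([] : List (List (String × Int))))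
  rw [List.nil_append] at h
  rw [← h]
  congr 1
  funext acc rc
  by_cases hg : g rc <;> simp [hg]

theorem pvB_eq (cs : List (List (String × Int))) :
    remove_larger_when_fully_covers_py_alt cs =
      if (cs.length : Int) ≤ 1 then cs
      else cs.filter (fun c => !((cs.map pvRect).any (fun s => pvStrictlyCovers (pvRect c) s))) := by
  unfold remove_larger_when_fully_covers_py_alt
  by_cases hn : (cs.length : Int) ≤ 1
  · rw [if_pos hn, if_pos hn]
  · rw [if_neg hn, if_neg hn]
    simp only
    rw [pvFoldlAppendIf
      (fun rc => pvCoversSmaller rc.1 (rc.1.2.2.1 * rc.1.2.2.2)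
        (PySem.List.sorted (cs.map pvRect) (fun r => r.2.2.1 * r.2.2.2) false))]
    rw [List.filter_congr (fun rc _ => by
      rw [pvCoversSmaller_eq_any rc.1 _ (PySem.List.sorted_pairwise _ _),
        pvAny_perm (PySem.List.sorted_perm (cs.map pvRect) (fun r => r.2.2.1 * r.2.2.2) false)])]
    exact pvZipFilterAux (fun r => !((cs.map pvRect).any (fun s => pvStrictlyCovers r s))) cs

-- ===== VERDICT (by name: the statement is the Claim_ definition above) =====
theorem remove_larger_when_fully_covers_py_spec : Claim_equal_remove_larger_when_fully_covers_py := by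
  intro cs _ _
  unfold Spec_remove_larger_when_fully_covers_py
  rw [pvA_eq, pvB_eq]
  by_cases hn : (cs.length : Int) ≤ 1
  · rw [if_pos hn, if_pos hn]
  · rw [if_neg hn, if_neg hn]
    have hfilter : (PySem.List.pyRange 0 (cs.length : Int) 1).filter
        (fun k => !(PySem.Set.contains (pvFinal cs) k)) =
      (PySem.List.pyRange 0 (cs.length : Int) 1).filter
        (fun k => !((cs.map pvRect).any (fun s => pvStrictlyCovers (pvR cs k) s))) :=
      List.filter_congr (fun k hk => by rw [pvCharacterize hk])
    rw [hfilter]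
    simp only [pvR]
    rw [pvFilterMapAux (fun k => PySem.List.pyGetD cs k [])
        (fun c => !((cs.map pvRect).any (fun s => pvStrictlyCovers (pvRect c) s)))
        (PySem.List.pyRange 0 (cs.length : Int) 1),
      PySem.List.map_pyGetD_pyRange_zero']
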